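-- pv_equiv track=rewrite | github.com/x1d3/mylabscratedwithpython | laba 6_3.py | count_matrices
-- ===== SOURCE A (Python) =====
-- def is_valid_matrix(matrix):
--     for row in matrix:
--         for cell in row:
--             if cell not in ('#', '.'):
--                 return False
--     return True
--
-- def count_matrices(matrix):
--     if not any('.' in row for row in matrix):
--         return 1
--
--     total_count = 0
--     for i in range(len(matrix)):
--         for j in range(len(matrix[i])):
--             if matrix[i][j] == '.':
--                 # Try placing a '.' at this position
--                 new_matrix = [list(row) for row in matrix]
--                 new_matrix[i][j] = '#'
--                 if is_valid_matrix(new_matrix):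
--                     total_count += count_matrices(new_matrix)
--
--     return total_count
-- ===== SOURCE B (Python) =====
-- def count_matrices(matrix):
--     # number of '.' cells; every fill order is distinct, so the answer is dots!
--     dots = sum(row.count('.') for row in matrix)
--     if dots == 0:
--         return 1
--     # a cell other than '#'/'.' keeps every filled matrix invalid, so nothing is counted
--     if any(row.count('.') + row.count('#') != len(row) for row in matrix):
--         return 0
--     result = 1
--     for i in range(2, dots + 1):
--         result *= i
--     return result
-- ===== Notes on version B (the rewrite author's own statement) =====
-- stated objective: alternative
-- what changed: Replaces the factorial-branching recursion (try every '.' cell, build a copy, recurse) by a closed form: one counting pass gives dots and validity, and the answer is 1 if dots=0, 0 if some cell is neither '#' nor '.', else dots factorial.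
import Mathlib
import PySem

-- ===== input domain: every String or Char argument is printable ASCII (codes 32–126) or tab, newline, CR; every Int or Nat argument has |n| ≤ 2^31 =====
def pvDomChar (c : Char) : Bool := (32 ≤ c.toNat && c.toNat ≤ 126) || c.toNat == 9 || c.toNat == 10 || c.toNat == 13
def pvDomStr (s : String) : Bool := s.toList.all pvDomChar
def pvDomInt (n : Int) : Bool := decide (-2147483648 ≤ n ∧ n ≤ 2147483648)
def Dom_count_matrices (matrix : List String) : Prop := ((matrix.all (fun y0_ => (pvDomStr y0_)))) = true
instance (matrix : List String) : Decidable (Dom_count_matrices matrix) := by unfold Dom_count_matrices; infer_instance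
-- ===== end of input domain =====

-- B replaces A's factorial-branching recursion by one counting pass plus a factorial
-- product (a different algorithm with the same return value, proved below).

-- ===== PORT A =====
-- helper used for termination of A's recursion: total number of '.' cells
def pvDots (m : List (List Char)) : Nat := (m.map (fun r => r.count '.')).sum

-- port of A's helper is_valid_matrix (early-return-false loop = List.all)
def is_valid_matrix (m : List (List Char)) : Bool :=
  m.all (fun row => row.all (fun cell => cell == '#' || cell == '.'))

theorem pv_row_dec (l : List Char) (j : Nat) (h : l.getD j 'x' = '.') :
    (l.set j '#').count '.' + 1 = l.count '.' := by
  induction l generalizing j with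
  | nil => simp [List.getD] at h
  | cons a l ih =>
    cases j with
    | zero =>
      simp only [List.getD_cons_zero] at h
      subst h
      simp [List.count_cons]
    | succ j =>
      simp only [List.getD_cons_succ] at h
      simp only [List.set_cons_succ, List.count_cons]
      have := ih j h
      by_cases ha : a = '.' <;> simp [ha] <;> omega

theorem pv_mat_dec (m : List (List Char)) (i j : Nat)
    (h : (m.getD i []).getD j 'x' = '.') :
    pvDots (m.set i ((m.getD i []).set j '#')) + 1 = pvDots m := by
  induction m generalizing i with
  | nil => simp [List.getD] at h
  | cons r rest ih =>
    cases i with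
    | zero =>
      simp only [List.getD_cons_zero] at h ⊢
      simp only [List.set_cons_zero, pvDots, List.map_cons, List.sum_cons]
      have := pv_row_dec r j h
      omega
    | succ i =>
      simp only [List.getD_cons_succ] at h ⊢
      simp only [List.set_cons_succ, pvDots, List.map_cons, List.sum_cons]
      have := ih i h
      simp only [pvDots] at this
      omega

mutual
-- transliteration of A's count_matrices on List (List Char); the two nested for-loops
-- over i and j are run as one recursion over the index pairs in loop order; indexing
-- m[i] / m[i][j] is getD (in A the indices are always in range)
def count_go (m : List (List Char)) : Int :=
  if (m.any (fun row => row.contains '.')) = false then 1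
  else
    count_loop m ((List.range m.length).flatMap
      (fun i => (List.range (m.getD i []).length).map (fun j => (i, j)))) 0
termination_by (pvDots m + 1, 0)
decreasing_by apply Prod.Lex.left; omega

def count_loop (m : List (List Char)) (ps : List (Nat × Nat)) (total : Int) : Int :=
  match ps with
  | [] => total
  | (i, j) :: rest =>
    let total' :=
      if h : (m.getD i []).getD j 'x' = '.' then
        if is_valid_matrix (m.set i ((m.getD i []).set j '#')) then
          total + count_go (m.set i ((m.getD i []).set j '#'))
        else total
      else total
    count_loop m rest total'
termination_by (pvDots m, ps.length)
decreasing_by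
  · rw [← pv_mat_dec m i j h]
    exact Prod.Lex.right _ (by simp)
  · exact Prod.Lex.right _ (by simp)
end

def count_matrices (matrix : List String) : Int :=
  count_go (matrix.map String.toList)

-- ===== PORT B =====
-- str.count / len on a Python str = List.count / length on its characters (exact)
def count_matrices_alt (matrix : List String) : Int :=
  let dots : Int := (matrix.map (fun row => ((row.toList.count '.' : Nat) : Int))).sum
  if dots == 0 then 1
  else if matrix.any (fun row =>
      !((((row.toList.count '.' : Nat) : Int) + ((row.toList.count '#' : Nat) : Int))
        == ((row.toList.length : Nat) : Int))) then 0
  else (PySem.List.pyRange 2 (dots + 1) 1).foldl (fun r i => r * i) 1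

-- ===== PRECONDITION & SPEC =====
def Spec_count_matrices (matrix : List String) (out : Int) : Prop := out = count_matrices_alt matrix
instance (matrix : List String) (out : Int) : Decidable (Spec_count_matrices matrix out) := by unfold Spec_count_matrices; infer_instance

-- ===== CLAIM (what is proved, stated in full; the proofs are below) =====
def Claim_equal_count_matrices : Prop := ∀ (matrix : List String), Dom_count_matrices matrix → Spec_count_matrices matrix (count_matrices matrix)

-- ===== LEMMAS AND PROOFS =====

-- closed form both sides are proved equal to
def pvF (m : List (List Char)) : Int :=
  if pvDots m = 0 then 1
  else if is_valid_matrix m then ((pvDots m).factorial : Int) else 0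

def pvTerm (m : List (List Char)) (p : Nat × Nat) : Int :=
  if (m.getD p.1 []).getD p.2 'x' = '.' then
    if is_valid_matrix (m.set p.1 ((m.getD p.1 []).set p.2 '#')) then
      count_go (m.set p.1 ((m.getD p.1 []).set p.2 '#'))
    else 0
  else 0

theorem pv_any_dot (m : List (List Char)) :
    (m.any (fun row => row.contains '.')) = false ↔ pvDots m = 0 := by
  induction m with
  | nil => simp [pvDots]
  | cons r rest ih =>
    simp only [List.any_cons, pvDots, List.map_cons, List.sum_cons, Bool.or_eq_false_iff]
    constructor
    · rintro ⟨h1, h2⟩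
      have : r.count '.' = 0 := by
        rw [List.count_eq_zero]
        intro hc
        simp [List.contains_iff_mem] at h1
        exact h1 hc
      have h2' := (ih).1 h2
      simp only [pvDots] at h2'
      omega
    · intro h
      have hr : r.count '.' = 0 := by omega
      have hrest : pvDots rest = 0 := by simp only [pvDots]; omega
      refine ⟨?_, (ih).2 hrest⟩
      rw [List.count_eq_zero] at hr
      simp [List.contains_iff_mem]
      exact hr

theorem pv_row_valid (l : List Char) (j : Nat) (h : l.getD j 'x' = '.') :
    ((l.set j '#').all (fun cell => cell == '#' || cell == '.')) =
      (l.all (fun cell => cell == '#' || cell == '.')) := by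
  induction l generalizing j with
  | nil => simp [List.getD] at h
  | cons a l ih =>
    cases j with
    | zero =>
      simp only [List.getD_cons_zero] at h
      subst h
      simp
    | succ j =>
      simp only [List.getD_cons_succ] at h
      simp [List.set_cons_succ, List.all_cons, ih j h]

theorem pv_mat_valid (m : List (List Char)) (i j : Nat)
    (h : (m.getD i []).getD j 'x' = '.') :
    is_valid_matrix (m.set i ((m.getD i []).set j '#')) = is_valid_matrix m := by
  induction m generalizing i with
  | nil => simp [List.getD] at h
  | cons r rest ih =>
    cases i with
    | zero =>
      simp only [List.getD_cons_zero] at h ⊢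
      simp [is_valid_matrix, List.all_cons, pv_row_valid r j h]
    | succ i =>
      simp only [List.getD_cons_succ] at h ⊢
      simp only [List.set_cons_succ, is_valid_matrix, List.all_cons] at *
      rw [ih i h]

theorem pv_loop_sum (m : List (List Char)) (ps : List (Nat × Nat)) (total : Int) :
    count_loop m ps total = total + (ps.map (pvTerm m)).sum := by
  induction ps generalizing total with
  | nil => simp [count_loop]
  | cons p rest ih =>
    obtain ⟨i, j⟩ := p
    rw [count_loop]
    simp only [List.map_cons, List.sum_cons]
    rw [ih]
    simp only [pvTerm, List.getD_eq_getElem?_getD]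
    split_ifs <;> ring

theorem pv_rowsum (l : List Char) (c : Int) :
    (((List.range l.length).map (fun j => if l.getD j 'x' = '.' then c else 0)).sum)
      = (l.count '.' : Int) * c := by
  induction l with
  | nil => simp
  | cons a l ih =>
    rw [List.length_cons, List.range_succ_eq_map]
    simp only [List.map_cons, List.map_map, List.sum_cons]
    have : ((List.range l.length).map
        ((fun j => if (a :: l).getD j 'x' = '.' then c else 0) ∘ Nat.succ)).sum
        = (l.count '.' : Int) * c := by
      rw [← ih]
      congr 1
    rw [this]
    by_cases ha : a = '.'
    · simp only [List.getD_cons_zero, if_pos ha, List.count_cons, ha]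
      push_cast
      simp
      ring
    · simp only [List.getD_cons_zero, if_neg ha, List.count_cons]
      have hb : ¬ (a == '.') = true := by simp [ha]
      simp [hb]

theorem pv_pairsum (m : List (List Char)) (c : Int) :
    (((List.range m.length).flatMap
        (fun i => (List.range (m.getD i []).length).map (fun j => (i, j)))).map
      (fun p => if (m.getD p.1 []).getD p.2 'x' = '.' then c else 0)).sum
      = (pvDots m : Int) * c := by
  induction m with
  | nil => simp [pvDots]
  | cons r rest ih =>
    rw [List.length_cons, List.range_succ_eq_map]
    simp only [List.flatMap_cons, List.map_append, List.sum_append, List.flatMap_map,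
      List.map_flatMap, List.map_map, Function.comp_def, List.getD_cons_zero,
      List.getD_cons_succ] at ih ⊢
    rw [pv_rowsum, ih]
    simp only [pvDots, List.map_cons, List.sum_cons]
    push_cast; ring

theorem pv_fact_of_valid (m : List (List Char)) (h : is_valid_matrix m = true) :
    pvF m = (((pvDots m).factorial : Nat) : Int) := by
  unfold pvF
  simp only [h, if_true]
  split_ifs with h0
  · simp [h0, Nat.factorial]
  · rfl

theorem pv_go_eq (N : Nat) : ∀ m, pvDots m ≤ N → count_go m = pvF m := by
  induction N with
  | zero =>
    intro m hm
    have h0 : pvDots m = 0 := Nat.le_zero.mp hm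
    have hz : (m.any (fun row => row.contains '.')) = false := (pv_any_dot m).mpr h0
    rw [count_go, if_pos hz]
    simp [pvF, h0]
  | succ N ih =>
    intro m hm
    rw [count_go]
    by_cases hz : (m.any (fun row => row.contains '.')) = false
    · have h0 := (pv_any_dot m).mp hz
      rw [if_pos hz]
      simp [pvF, h0]
    · have h0 : pvDots m ≠ 0 := fun h => hz ((pv_any_dot m).mpr h)
      rw [if_neg hz, pv_loop_sum]
      have hterm : ∀ p ∈ (List.range m.length).flatMap
          (fun i => (List.range (m.getD i []).length).map (fun j => (i, j))),
          pvTerm m p =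
          (fun p : Nat × Nat => if (m.getD p.1 []).getD p.2 'x' = '.' then
            (if is_valid_matrix m = true then (((pvDots m - 1).factorial : Nat) : Int)
             else 0) else 0) p := by
        rintro ⟨i, j⟩ _
        simp only [pvTerm]
        by_cases h : (m.getD i []).getD j 'x' = '.'
        · rw [if_pos h, if_pos h, pv_mat_valid m i j h]
          have hdec := pv_mat_dec m i j h
          by_cases hv : is_valid_matrix m = true
          · rw [if_pos hv, if_pos hv]
            rw [ih _ (by omega)]
            rw [pv_fact_of_valid _ (by rw [pv_mat_valid m i j h]; exact hv)]
            congr 2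
            omega
          · rw [if_neg hv, if_neg hv]
        · rw [if_neg h, if_neg h]
      rw [List.map_congr_left hterm, pv_pairsum]
      by_cases hv : is_valid_matrix m = true
      · rw [if_pos hv]
        simp only [pvF, if_neg h0, if_pos hv]
        have hmf : pvDots m * (pvDots m - 1).factorial = (pvDots m).factorial :=
          Nat.mul_factorial_pred (by omega)
        rw [← hmf]
        push_cast; ring
      · rw [if_neg hv]
        simp [pvF, h0, hv]

theorem pv_count_bound (l : List Char) : l.count '.' + l.count '#' <= l.length := by
  induction l with
  | nil => simp
  | cons a l ih =>
    simp only [List.count_cons, List.length_cons]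
    by_cases ha : a = '.' <;> by_cases hb : a = '#' <;> simp [ha, hb] <;> omega

theorem pv_count_valid (l : List Char) :
    (l.count '.' + l.count '#' = l.length) ↔ (∀ x ∈ l, x = '#' ∨ x = '.') := by
  induction l with
  | nil => simp
  | cons a l ih =>
    have hb := pv_count_bound l
    simp only [List.count_cons, List.length_cons, List.forall_mem_cons]
    by_cases ha : a = '.'
    · simp only [ha]
      norm_num
      rw [← ih, if_neg (show ¬(('.' : Char) = '#') by decide)]
      omega
    · by_cases hh : a = '#'
      · simp only [hh]
        norm_num
        rw [← ih, if_neg (show ¬(('#' : Char) = '.') by decide)]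
        omega
      · have h1 : ¬ (a == '.') = true := by simp [ha]
        have h2 : ¬ (a == '#') = true := by simp [hh]
        simp only [h1, h2, if_neg, ha, hh, false_or, false_and]
        norm_num [ha, hh]
        omega

theorem pv_row_beq (l : List Char) :
    ((((l.count '.' : Nat) : Int) + ((l.count '#' : Nat) : Int)) == ((l.length : Nat) : Int))
      = l.all (fun cell => cell == '#' || cell == '.') := by
  have h := pv_count_valid l
  cases hall : l.all (fun cell => cell == '#' || cell == '.') with
  | true =>
    have hP : ∀ x ∈ l, x = '#' ∨ x = '.' := by
      intro x hx
      have := List.all_eq_true.mp hall x hx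
      simpa using this
    simp only [beq_iff_eq]
    have := h.mpr hP
    push_cast
    omega
  | false =>
    have hne : ¬ (l.count '.' + l.count '#' = l.length) := by
      intro hc
      have : l.all (fun cell => cell == '#' || cell == '.') = true := by
        rw [List.all_eq_true]
        intro x hx
        have := h.mp hc x hx
        simpa using this
      rw [this] at hall
      cases hall
    simp only [beq_eq_false_iff_ne, ne_eq]
    push_cast
    omega

theorem pv_alt_valid (matrix : List String) :
    (matrix.any (fun row =>
        !((((row.toList.count '.' : Nat) : Int) + ((row.toList.count '#' : Nat) : Int))
          == ((row.toList.length : Nat) : Int))))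
      = !(is_valid_matrix (matrix.map String.toList)) := by
  induction matrix with
  | nil => simp [is_valid_matrix]
  | cons r rest ih =>
    have hx : is_valid_matrix (List.map String.toList (r :: rest))
        = ((r.toList.all fun c => c == '#' || c == '.')
            && is_valid_matrix (List.map String.toList rest)) := by
      simp [is_valid_matrix]
    rw [List.any_cons, hx, pv_row_beq, ih, Bool.not_and]

theorem pv_dots_cast (matrix : List String) :
    (matrix.map (fun row => ((row.toList.count '.' : Nat) : Int))).sum
      = ((pvDots (matrix.map String.toList) : Nat) : Int) := by
  induction matrix with
  | nil => simp [pvDots]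
  | cons r rest ih =>
    simp only [List.map_cons, List.sum_cons, pvDots, ih]
    push_cast
    simp [pvDots]

theorem pv_factloop (n : Nat) :
    (PySem.List.pyRange 2 ((n : Int) + 1) 1).foldl (fun r i => r * i) 1
      = (n.factorial : Int) := by
  induction n with
  | zero =>
    rw [PySem.List.pyRange_one_eq_nil (by norm_num)]
    simp [Nat.factorial]
  | succ n ih =>
    push_cast
    by_cases hn : n = 0
    · subst hn
      norm_num
    · have h2 : (2:Int) ≤ (n : Int) + 1 := by omega
      rw [PySem.List.pyRange_one_succ_right h2]
      rw [List.foldl_append]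
      push_cast at ih
      rw [ih]
      rw [show (n+1 : Nat).factorial = (n+1) * n.factorial from Nat.factorial_succ n]
      simp only [List.foldl_cons, List.foldl_nil]
      push_cast; ring

-- ===== VERDICT (by name: the statement is the Claim_ definition above) =====
theorem count_matrices_spec : Claim_equal_count_matrices := by
  unfold Claim_equal_count_matrices
  intro matrix _
  unfold Spec_count_matrices count_matrices count_matrices_alt
  rw [pv_go_eq (pvDots (matrix.map String.toList)) _ le_rfl]
  rw [pv_dots_cast, pv_alt_valid]
  by_cases h0 : pvDots (matrix.map String.toList) = 0
  · simp [pvF, h0]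
  · rw [if_neg (by simp [h0])]
    by_cases hv : is_valid_matrix (matrix.map String.toList) = true
    · rw [hv, if_neg (by simp)]
      rw [pv_factloop]
      simp [pvF, h0, hv]
    · have hvf : is_valid_matrix (matrix.map String.toList) = false := by
        simpa using hv
      rw [hvf, if_pos (by decide)]
      simp [pvF, h0, hvf]
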